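-- pv_equiv track=rewrite | github.com/Sergitxin22/Prog1 | 2. Exámenes segundo parcial/curso 2022-23/Examen Mariluz/solucion_examen_mariluz.py | usuarios_mas_activos
-- ===== SOURCE A (Python) =====
-- def usuarios_dias(lista_usuarios):
--     diccionario_usuarios_dias = {}
--
--     for usuario in lista_usuarios:
--         nombre = usuario[1]
--         practica_actividad = usuario[3]
--
--         contador_dia_actividad = 0
--
--         for dia in practica_actividad:
--             if dia == '1':
--                 contador_dia_actividad += 1
--
--         diccionario_usuarios_dias[nombre] = contador_dia_actividad
--
--     return diccionario_usuarios_dias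
--
-- def usuarios_mas_activos(lista_usuarios):
--     nombres_usuarios_mas_activos = []
--     max_dias_activos = 0
--     diccionario_usuarios_dias = usuarios_dias(lista_usuarios)
--
--     for usuario in diccionario_usuarios_dias:
--         dias_activos_usuario = diccionario_usuarios_dias[usuario]
--         if dias_activos_usuario > max_dias_activos:
--             max_dias_activos = dias_activos_usuario
--
--     for usuario in diccionario_usuarios_dias:
--         dias_activos_usuario = diccionario_usuarios_dias[usuario]
--         if dias_activos_usuario == max_dias_activos:
--             nombres_usuarios_mas_activos.append(usuario)
--
--     return nombres_usuarios_mas_activos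
-- ===== SOURCE B (Python) =====
-- def usuarios_mas_activos(lista_usuarios):
--     # Alternative decomposition: build the name -> active-day-count dict with a
--     # comprehension, then find the maximum and collect its holders in ONE pass.
--     conteo = {usuario[1]: sum(1 for dia in usuario[3] if dia == '1')
--               for usuario in lista_usuarios}
--     max_dias = 0
--     resultado = []
--     for nombre, dias in conteo.items():
--         if dias > max_dias:
--             max_dias = dias
--             resultado = [nombre]
--         elif dias == max_dias:
--             resultado.append(nombre)
--     return resultado
-- ===== Notes on version B (the rewrite author's own statement) =====
-- stated objective: simpler
-- what changed: B builds the per-user count dict with a comprehension and replaces A's two separate scans of the dict (one to find the maximum, one to collect its holders) with a single pass that resets the result list whenever a strictly larger count appears.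
import Mathlib
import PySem

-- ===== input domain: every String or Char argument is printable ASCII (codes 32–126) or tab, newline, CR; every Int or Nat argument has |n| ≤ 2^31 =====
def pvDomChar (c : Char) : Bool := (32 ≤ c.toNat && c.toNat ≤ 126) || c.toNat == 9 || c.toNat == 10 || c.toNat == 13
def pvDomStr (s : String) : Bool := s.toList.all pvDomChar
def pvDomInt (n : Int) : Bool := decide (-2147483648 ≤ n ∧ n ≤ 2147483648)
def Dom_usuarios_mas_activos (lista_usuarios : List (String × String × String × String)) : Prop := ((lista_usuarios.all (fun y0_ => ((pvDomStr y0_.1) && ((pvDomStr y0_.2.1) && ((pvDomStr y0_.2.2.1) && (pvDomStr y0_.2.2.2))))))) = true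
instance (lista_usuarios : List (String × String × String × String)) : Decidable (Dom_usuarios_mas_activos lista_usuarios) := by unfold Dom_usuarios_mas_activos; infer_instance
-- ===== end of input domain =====

-- B builds the count dict with a comprehension and finds the maximum and its holders in one
-- pass over the dict instead of A's two separate scans; objective: simpler.


-- ===== PORT A =====
def usuarios_dias (lista_usuarios : List (String × String × String × String)) : PySem.Dict String Int :=
  lista_usuarios.foldl
    (fun diccionario usuario =>
      diccionario.insert usuario.2.1
        (usuario.2.2.2.toList.foldl
          (fun contador dia => if dia == '1' then contador + 1 else contador) (0 : Int)))
    PySem.Dict.empty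

-- 'diccionario_usuarios_dias[usuario]' with 'usuario' drawn from the dict's own keys never
-- raises; '(d.get? u).getD 0' is exact on every reachable lookup.
def usuarios_mas_activos (lista_usuarios : List (String × String × String × String)) : List String :=
  let d := usuarios_dias lista_usuarios
  let max_dias_activos :=
    d.keys.foldl
      (fun max_dias usuario =>
        let dias := (d.get? usuario).getD 0
        if dias > max_dias then dias else max_dias) (0 : Int)
  d.keys.foldl
    (fun nombres usuario =>
      let dias := (d.get? usuario).getD 0
      if dias == max_dias_activos then nombres ++ [usuario] else nombres) ([] : List String)

-- ===== PORT B =====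
-- sum(1 for dia in s if dia == '1')
def pvSumOnes (s : String) : Int :=
  ((s.toList.filter (fun dia => dia == '1')).map (fun _ => (1 : Int))).sum

def usuarios_mas_activos_alt (lista_usuarios : List (String × String × String × String)) : List String :=
  let conteo :=
    lista_usuarios.foldl
      (fun d usuario => d.insert usuario.2.1 (pvSumOnes usuario.2.2.2)) PySem.Dict.empty
  (conteo.items.foldl
    (fun st p =>
      if p.2 > st.1 then (p.2, [p.1])
      else if p.2 == st.1 then (st.1, st.2 ++ [p.1])
      else st)
    ((0 : Int), ([] : List String))).2

-- ===== PRECONDITION & SPEC =====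
def Spec_usuarios_mas_activos (lista_usuarios : List (String × String × String × String)) (out : List String) : Prop := out = usuarios_mas_activos_alt lista_usuarios
instance (lista_usuarios : List (String × String × String × String)) (out : List String) : Decidable (Spec_usuarios_mas_activos lista_usuarios out) := by unfold Spec_usuarios_mas_activos; infer_instance

-- ===== CLAIM (what is proved, stated in full; the proofs are below) =====
def Claim_equal_usuarios_mas_activos : Prop := ∀ (lista_usuarios : List (String × String × String × String)), Dom_usuarios_mas_activos lista_usuarios → Spec_usuarios_mas_activos lista_usuarios (usuarios_mas_activos lista_usuarios)

-- ===== LEMMAS AND PROOFS =====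

-- the running maximum A's first loop computes
def pvFMax {κ : Type} (l : List (κ × Int)) (m : Int) : Int :=
  l.foldl (fun a p => if p.2 > a then p.2 else a) m

theorem pvFMax_le {κ : Type} (l : List (κ × Int)) (m : Int) : m ≤ pvFMax l m := by
  induction l generalizing m with
  | nil => simp [pvFMax]
  | cons p t ih =>
    simp only [pvFMax, List.foldl_cons] at *
    by_cases h : p.2 > m
    · simp only [if_pos h]; exact le_trans (le_of_lt h) (ih p.2)
    · simp only [if_neg h]; exact ih m

-- the single pass of B equals "final maximum + filter", with the incoming accumulator
-- surviving exactly when the maximum never rises above its initial value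
theorem pvOnePass_eq {κ : Type} (l : List (κ × Int)) (m : Int) (acc : List κ) :
    l.foldl
      (fun st p =>
        if p.2 > st.1 then (p.2, [p.1])
        else if p.2 == st.1 then (st.1, st.2 ++ [p.1])
        else st) (m, acc)
    = (pvFMax l m,
       (if pvFMax l m = m then acc else [])
         ++ (l.filter (fun p => p.2 == pvFMax l m)).map Prod.fst) := by
  induction l generalizing m acc with
  | nil => simp [pvFMax]
  | cons p t ih =>
    have hstep : pvFMax (p :: t) m = pvFMax t (if p.2 > m then p.2 else m) := by
      simp [pvFMax]
    by_cases h1 : p.2 > m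
    · have hle : p.2 ≤ pvFMax t p.2 := pvFMax_le t p.2
      have hne_m : pvFMax t p.2 ≠ m := by omega
      rw [List.foldl_cons, if_pos h1, ih, hstep, if_pos h1, List.filter_cons,
        if_neg hne_m]
      by_cases h2 : p.2 = pvFMax t p.2
      · simp [← h2]
      · have hb : (p.2 == pvFMax t p.2) = false := by simp [h2]
        simp [hb, Ne.symm h2]
    · by_cases h2 : p.2 = m
      · have hM : pvFMax (p :: t) m = pvFMax t m := by rw [hstep, if_neg h1]
        rw [List.foldl_cons, if_neg h1, h2, if_pos (beq_self_eq_true m), ih, hM,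
          List.filter_cons, h2]
        by_cases h3 : pvFMax t m = m
        · rw [h3]; simp
        · have hb : (m == pvFMax t m) = false := by
            simp only [beq_eq_false_iff_ne, ne_eq]
            exact fun h => h3 h.symm
          rw [if_neg h3, if_neg h3, hb]
          simp
      · have h2b : (p.2 == m) = false := by simp [h2]
        have hM : pvFMax (p :: t) m = pvFMax t m := by rw [hstep, if_neg h1]
        have hle : m ≤ pvFMax t m := pvFMax_le t m
        have hlt : p.2 < m := lt_of_le_of_ne (not_lt.mp h1) h2
        have hne : (p.2 == pvFMax t m) = false := by
          simp only [beq_eq_false_iff_ne, ne_eq]; omega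
        rw [List.foldl_cons, if_neg h1, h2b, ih, hM, List.filter_cons, hne]
        simp

-- counting with a filtered 0/1 generator sum equals A's counting loop
theorem pvCount_aux (cs : List Char) (a : Int) :
    cs.foldl (fun contador dia => if dia == '1' then contador + 1 else contador) a
      = a + ((cs.filter (fun dia => dia == '1')).map (fun _ => (1 : Int))).sum := by
  induction cs generalizing a with
  | nil => simp
  | cons d t ih =>
    rw [List.foldl_cons, List.filter_cons]
    by_cases h : (d == '1') = true
    · rw [if_pos h, if_pos h, ih, List.map_cons, List.sum_cons]; ring
    · rw [if_neg h, if_neg h, ih]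

theorem pvSumOnes_eq (s : String) :
    pvSumOnes s
      = s.toList.foldl (fun contador dia => if dia == '1' then contador + 1 else contador)
          (0 : Int) := by
  rw [pvCount_aux, pvSumOnes, zero_add]

-- the two dict builds coincide
theorem pvDict_eq (l : List (String × String × String × String)) :
    l.foldl (fun d usuario => d.insert usuario.2.1 (pvSumOnes usuario.2.2.2))
        PySem.Dict.empty
      = usuarios_dias l := by
  unfold usuarios_dias
  have h : (fun (d : PySem.Dict String Int) (usuario : String × String × String × String) =>
        d.insert usuario.2.1 (pvSumOnes usuario.2.2.2))
      = (fun d usuario =>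
        d.insert usuario.2.1
          (usuario.2.2.2.toList.foldl
            (fun contador dia => if dia == '1' then contador + 1 else contador) (0 : Int))) := by
    funext d u; rw [pvSumOnes_eq]
  rw [h]

theorem pvNodupKeys (l : List (String × String × String × String)) :
    (usuarios_dias l).keys.Nodup := by
  unfold usuarios_dias
  exact PySem.Dict.nodup_keys_foldl_insert_key l (fun u => u.2.1) _ _
    PySem.Dict.nodup_keys_empty

-- A's two scans over the dict equal B's single pass, for any dict with distinct keys
theorem pvTwoLoops_eq (d : PySem.Dict String Int) (hnd : d.keys.Nodup) :
    d.keys.foldl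
      (fun nombres usuario =>
        if (d.get? usuario).getD 0
            == d.keys.foldl
                 (fun max_dias u =>
                   if (d.get? u).getD 0 > max_dias then (d.get? u).getD 0 else max_dias)
                 (0 : Int)
          then nombres ++ [usuario] else nombres) ([] : List String)
    = (d.items.foldl
        (fun st p =>
          if p.2 > st.1 then (p.2, [p.1])
          else if p.2 == st.1 then (st.1, st.2 ++ [p.1])
          else st)
        ((0 : Int), ([] : List String))).2 := by
  have hitems : d.items = d.keys.map (fun k => (k, d.getD k 0)) :=
    PySem.Dict.items_eq_map_keys d hnd 0
  have hg : ∀ k : String, (d.get? k).getD 0 = d.getD k 0 := fun _ => rfl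
  rw [pvOnePass_eq, PySem.List.foldl_append_if_eq_filter]
  simp only [ite_self, List.nil_append, hitems, List.filter_map, List.map_map,
    pvFMax, List.foldl_map, hg]
  simp [Function.comp_def]

-- ===== VERDICT (by name: the statement is the Claim_ definition above) =====
theorem usuarios_mas_activos_spec : Claim_equal_usuarios_mas_activos := by
  intro l _
  show usuarios_mas_activos l = usuarios_mas_activos_alt l
  simp only [usuarios_mas_activos, usuarios_mas_activos_alt, pvDict_eq]
  exact pvTwoLoops_eq (usuarios_dias l) (pvNodupKeys l)
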